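-- pv_equiv track=rewrite | github.com/ericksoa/agentic-evolve | showcase/code-golf/32597951/gen0_v3.py | solve
-- ===== SOURCE A (Python) =====
-- def solve(grid):
--     rows = len(grid)
--     cols = len(grid[0])
--     result = [row[:] for row in grid]
--
--     # Find bounding box of 8s
--     eights = [(r, c) for r in range(rows) for c in range(cols) if grid[r][c] == 8]
--     if not eights:
--         return result
--
--     min_r = min(r for r, c in eights)
--     max_r = max(r for r, c in eights)
--     min_c = min(c for r, c in eights)
--     max_c = max(c for r, c in eights)
--
--     # Find row period using rows outside the 8 region
--     def find_row_period():
--         safe_rows = [r for r in range(rows) if all(grid[r][c] != 8 for c in range(cols))]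
--         if len(safe_rows) < 2:
--             return 1
--         for p in range(1, len(safe_rows)):
--             ok = True
--             for i in range(len(safe_rows) - p):
--                 if grid[safe_rows[i]] != grid[safe_rows[i + p]]:
--                     ok = False
--                     break
--             if ok:
--                 return p
--         return len(safe_rows)
--
--     # Find col period using cols outside the 8 region
--     def find_col_period():
--         safe_cols = [c for c in range(cols) if all(grid[r][c] != 8 for r in range(rows))]
--         if len(safe_cols) < 2:
--             return 1
--         for p in range(1, len(safe_cols)):
--             ok = True
--             for i in range(len(safe_cols) - p):
--                 col_i = [grid[r][safe_cols[i]] for r in range(rows)]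
--                 col_ip = [grid[r][safe_cols[i + p]] for r in range(rows)]
--                 if col_i != col_ip:
--                     ok = False
--                     break
--             if ok:
--                 return p
--         return len(safe_cols)
--
--     rp = find_row_period()
--     cp = find_col_period()
--
--     # Find reference rows and cols (outside 8 region)
--     safe_rows = [r for r in range(rows) if all(grid[r][c] != 8 for c in range(cols))]
--     safe_cols = [c for c in range(cols) if all(grid[r][c] != 8 for r in range(rows))]
--
--     # For each cell in the 8 region that has value 1
--     for r in range(min_r, max_r + 1):
--         for c in range(min_c, max_c + 1):
--             if grid[r][c] == 1:
--                 # Find expected value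
--                 ref_r = safe_rows[r % rp] if safe_rows else r
--                 ref_c = safe_cols[c % cp] if safe_cols else c
--                 expected = grid[ref_r][ref_c]
--                 if expected == 0:
--                     result[r][c] = 3
--
--     return result
-- ===== SOURCE B (Python) =====
-- def solve(grid):
--     rows = len(grid)
--     cols = len(grid[0])
--     row8 = [any(row[c] == 8 for c in range(cols)) for row in grid]
--     col8 = [any(grid[r][c] == 8 for r in range(rows)) for c in range(cols)]
--     if not any(row8):
--         return [row[:] for row in grid]
--     r8 = [r for r in range(rows) if row8[r]]
--     c8 = [c for c in range(cols) if col8[c]]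
--     min_r, max_r = r8[0], r8[-1]
--     min_c, max_c = c8[0], c8[-1]
--     safe_rows = [r for r in range(rows) if not row8[r]]
--     safe_cols = [c for c in range(cols) if not col8[c]]
--
--     def smallest_period(seq):
--         # KMP prefix function: smallest period = n - (longest proper border)
--         n = len(seq)
--         if n < 2:
--             return 1
--         pi = [0]
--         for i in range(1, n):
--             k = pi[i - 1]
--             while k > 0 and seq[i] != seq[k]:
--                 k = pi[k - 1]
--             if seq[i] == seq[k]:
--                 k += 1
--             pi.append(k)
--         return n - pi[n - 1]
--
--     rp = smallest_period([grid[r] for r in safe_rows])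
--     cp = smallest_period([[grid[r][c] for r in range(rows)] for c in safe_cols])
--
--     ref_cs = [(c, safe_cols[c % cp] if safe_cols else c) for c in range(min_c, max_c + 1)]
--     out = []
--     for r in range(rows):
--         row = grid[r]
--         if min_r <= r <= max_r:
--             ref_row = grid[safe_rows[r % rp]] if safe_rows else row
--             new = row[:]
--             for c, rc in ref_cs:
--                 if row[c] == 1 and ref_row[rc] == 0:
--                     new[c] = 3
--             out.append(new)
--         else:
--             out.append(row[:])
--     return out
-- ===== Notes on version B (the rewrite author's own statement) =====
-- stated objective: faster
-- what changed: B computes the row/column period with the KMP prefix (failure) function — smallest period = n minus the longest proper border — instead of A's try-every-shift quadratic scan, derives the 8-bounding box from per-row/per-column flag scans instead of A's materialised eights coordinate list with four min/max generator passes, precomputes the column key lists and a reference-column table once, and rebuilds the output row by row instead of writing cells into a copied grid.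
import Mathlib
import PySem

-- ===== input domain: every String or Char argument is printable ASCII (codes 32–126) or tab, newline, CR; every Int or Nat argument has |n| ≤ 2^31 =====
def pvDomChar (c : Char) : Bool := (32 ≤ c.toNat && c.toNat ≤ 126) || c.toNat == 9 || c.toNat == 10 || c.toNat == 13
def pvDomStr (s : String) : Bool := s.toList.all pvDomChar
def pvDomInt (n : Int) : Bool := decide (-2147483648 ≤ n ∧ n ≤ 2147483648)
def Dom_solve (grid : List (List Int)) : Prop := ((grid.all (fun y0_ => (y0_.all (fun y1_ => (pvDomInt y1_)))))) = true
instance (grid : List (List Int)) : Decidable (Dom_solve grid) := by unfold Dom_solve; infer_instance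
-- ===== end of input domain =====

-- B replaces A's quadratic try-every-shift period search by the KMP prefix (failure) function
-- (smallest period = n - longest proper border), derives the 8-bounding box from per-row/
-- per-column flags, and rebuilds the output row by row with a precomputed reference-column
-- table instead of writing cells into a copied grid; objective: faster period computation.

-- ===== PORT A =====
def findRowPeriodA (grid : List (List Int)) : Nat :=
  let rows := grid.length
  let cols := (grid.headD []).length
  let safe_rows := (List.range rows).filter (fun r =>
    (List.range cols).all (fun c => !((grid.getD r []).getD c 0 == 8)))
  if safe_rows.length < 2 then 1
  else
    match (List.range' 1 (safe_rows.length - 1)).find? (fun p =>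
        (List.range (safe_rows.length - p)).all (fun i =>
          grid.getD (safe_rows.getD i 0) [] == grid.getD (safe_rows.getD (i + p) 0) [])) with
    | some p => p
    | none => safe_rows.length

def findColPeriodA (grid : List (List Int)) : Nat :=
  let rows := grid.length
  let cols := (grid.headD []).length
  let safe_cols := (List.range cols).filter (fun c =>
    (List.range rows).all (fun r => !((grid.getD r []).getD c 0 == 8)))
  if safe_cols.length < 2 then 1
  else
    match (List.range' 1 (safe_cols.length - 1)).find? (fun p =>
        (List.range (safe_cols.length - p)).all (fun i =>
          ((List.range rows).map (fun r => (grid.getD r []).getD (safe_cols.getD i 0) 0)) ==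
          ((List.range rows).map (fun r => (grid.getD r []).getD (safe_cols.getD (i + p) 0) 0)))) with
    | some p => p
    | none => safe_cols.length

def solve (grid : List (List Int)) : List (List Int) :=
  let rows := grid.length
  let cols := (grid.headD []).length
  let result := grid.map (fun row => row)
  let eights := ((List.range rows).map (fun r =>
      ((List.range cols).filter (fun c => (grid.getD r []).getD c 0 == 8)).map (fun c => (r, c)))).flatten
  if eights = [] then result
  else
    let min_r := (PySem.List.min? (eights.map (fun e => e.1)) (fun x => x)).getD 0
    let max_r := (PySem.List.max? (eights.map (fun e => e.1)) (fun x => x)).getD 0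
    let min_c := (PySem.List.min? (eights.map (fun e => e.2)) (fun x => x)).getD 0
    let max_c := (PySem.List.max? (eights.map (fun e => e.2)) (fun x => x)).getD 0
    let rp := findRowPeriodA grid
    let cp := findColPeriodA grid
    let safe_rows := (List.range rows).filter (fun r =>
      (List.range cols).all (fun c => !((grid.getD r []).getD c 0 == 8)))
    let safe_cols := (List.range cols).filter (fun c =>
      (List.range rows).all (fun r => !((grid.getD r []).getD c 0 == 8)))
    (List.range' min_r (max_r + 1 - min_r)).foldl (fun res r =>
      (List.range' min_c (max_c + 1 - min_c)).foldl (fun res2 c =>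
        if (grid.getD r []).getD c 0 == 1 then
          let ref_r := if safe_rows = [] then r else safe_rows.getD (r % rp) 0
          let ref_c := if safe_cols = [] then c else safe_cols.getD (c % cp) 0
          if (grid.getD ref_r []).getD ref_c 0 == 0 then
            res2.set r ((res2.getD r []).set c 3)
          else res2
        else res2) res) result

-- ===== PORT B =====
-- the KMP fallback chain `while k > 0 and seq[i] != seq[k]: k = pi[k-1]`; fuel = the initial k
-- suffices because pi[j] ≤ j makes k strictly decrease (established in pv_fall_spec below)
def pvFall (seq : List (List Int)) (pi : List Nat) (x : List Int) : Nat → Nat → Nat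
  | 0, k => k
  | fuel + 1, k => if 0 < k ∧ x ≠ seq.getD k [] then pvFall seq pi x fuel (pi.getD (k - 1) 0) else k

-- one iteration of `for i in range(1, n)`: compute and append pi[i]
def pvKmpStep (seq : List (List Int)) (pi : List Nat) (i : Nat) : List Nat :=
  let k0 := pi.getLastD 0
  let k1 := pvFall seq pi (seq.getD i []) k0 k0
  let k := if seq.getD i [] == seq.getD k1 [] then k1 + 1 else k1
  pi ++ [k]

def periodB (seq : List (List Int)) : Nat :=
  let n := seq.length
  if n < 2 then 1
  else n - ((List.range' 1 (n - 1)).foldl (pvKmpStep seq) [0]).getLastD 0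

def solve_alt (grid : List (List Int)) : List (List Int) :=
  let rows := grid.length
  let cols := (grid.headD []).length
  let row8 := grid.map (fun row => (List.range cols).any (fun c => row.getD c 0 == 8))
  let col8 := (List.range cols).map (fun c =>
    (List.range rows).any (fun r => (grid.getD r []).getD c 0 == 8))
  if row8.any (fun b => b) then
    let r8 := (List.range rows).filter (fun r => row8.getD r false)
    let c8 := (List.range cols).filter (fun c => col8.getD c false)
    let min_r := r8.headD 0
    let max_r := r8.getLastD 0
    let min_c := c8.headD 0
    let max_c := c8.getLastD 0
    let safe_rows := (List.range rows).filter (fun r => !(row8.getD r false))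
    let safe_cols := (List.range cols).filter (fun c => !(col8.getD c false))
    let rp := periodB (safe_rows.map (fun r => grid.getD r []))
    let cp := periodB (safe_cols.map (fun c => (List.range rows).map (fun r => (grid.getD r []).getD c 0)))
    let ref_cs := (List.range' min_c (max_c + 1 - min_c)).map (fun c =>
      (c, if safe_cols = [] then c else safe_cols.getD (c % cp) 0))
    (List.range rows).map (fun r =>
      let row := grid.getD r []
      if min_r ≤ r ∧ r ≤ max_r then
        let refRow := if safe_rows = [] then row else grid.getD (safe_rows.getD (r % rp) 0) []
        ref_cs.foldl (fun nw p =>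
          if row.getD p.1 0 == 1 && refRow.getD p.2 0 == 0 then nw.set p.1 3 else nw) row
      else row)
  else grid.map (fun row => row)

-- ===== PRECONDITION & SPEC =====
-- Pre_ excludes exactly the inputs where the Python A raises IndexError: the empty grid
-- (grid[0]) and ragged grids with a row shorter than the first row (grid[r][c] scans).
def Pre_solve (grid : List (List Int)) : Prop :=
  grid ≠ [] ∧ ∀ row ∈ grid, (grid.headD []).length ≤ row.length
instance (grid : List (List Int)) : Decidable (Pre_solve grid) := by unfold Pre_solve; infer_instance
def pvWitness_solve : List (List Int) := [[8, 1], [0, 2]]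
def Spec_solve (grid : List (List Int)) (out : List (List Int)) : Prop := out = solve_alt grid
instance (grid : List (List Int)) (out : List (List Int)) : Decidable (Spec_solve grid out) := by unfold Spec_solve; infer_instance

-- ===== CLAIM (what is proved, stated in full; the proofs are below) =====
def Claim_equal_solve : Prop := ∀ (grid : List (List Int)), Dom_solve grid → Pre_solve grid → Spec_solve grid (solve grid)


-- ===== LEMMAS AND PROOFS =====

-- ---- part 1: the KMP prefix function computes longest proper borders,
-- ----         hence periodB = A's first-shift-that-matches search ----

-- "k is a border length of the prefix of length m of the (getD-padded) sequence"
def pvBrd (s : List (List Int)) (m k : Nat) : Prop :=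
  k ≤ m ∧ ∀ j, j < k → s.getD j [] = s.getD (m - k + j) []

-- v is the longest proper border length of the prefix of length i+1
def pvPiSpec (s : List (List Int)) (i v : Nat) : Prop :=
  v ≤ i ∧ pvBrd s (i + 1) v ∧ ∀ k, k ≤ i → pvBrd s (i + 1) k → k ≤ v

lemma pv_brd_zero (s : List (List Int)) (m : Nat) : pvBrd s m 0 :=
  ⟨Nat.zero_le m, fun j hj => absurd hj (Nat.not_lt_zero j)⟩

lemma pv_brd_sub (s : List (List Int)) {i m k : Nat}
    (hm : pvBrd s i m) (hk : pvBrd s i k) (h : k ≤ m) : pvBrd s m k := by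
  refine ⟨h, fun j hj => ?_⟩
  have h1 := hk.2 j hj
  have h2 := hm.2 (m - k + j) (by omega)
  have he : i - m + (m - k + j) = i - k + j := by have := hm.1; omega
  rw [he] at h2
  rw [h1, h2]

lemma pv_brd_trans (s : List (List Int)) {i m k : Nat}
    (hm : pvBrd s i m) (hk : pvBrd s m k) : pvBrd s i k := by
  refine ⟨le_trans hk.1 hm.1, fun j hj => ?_⟩
  have h1 := hk.2 j hj
  have h2 := hm.2 (m - k + j) (by have := hk.1; omega)
  have he : i - m + (m - k + j) = i - k + j := by have := hk.1; have := hm.1; omega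
  rw [he] at h2
  rw [h1, h2]

lemma pv_brd_ext (s : List (List Int)) {i k : Nat} (h : k ≤ i) :
    pvBrd s (i + 1) (k + 1) ↔ (pvBrd s i k ∧ s.getD k [] = s.getD i []) := by
  constructor
  · intro ⟨h1, h2⟩
    refine ⟨⟨h, fun j hj => ?_⟩, ?_⟩
    · have h3 := h2 j (by omega)
      have he : i + 1 - (k + 1) + j = i - k + j := by omega
      rwa [he] at h3
    · have h3 := h2 k (by omega)
      have he : i + 1 - (k + 1) + k = i := by omega
      rwa [he] at h3
  · intro ⟨⟨_, h2⟩, h3⟩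
    refine ⟨by omega, fun j hj => ?_⟩
    have he : i + 1 - (k + 1) + j = i - k + j := by omega
    rw [he]
    rcases Nat.lt_or_ge j k with hjk | hjk
    · exact h2 j hjk
    · have hjeq : j = k := by omega
      rw [hjeq, show i - k + k = i by omega]
      exact h3

lemma pv_getLastD_eq_getD (l : List Nat) (h : l ≠ []) :
    l.getLastD 0 = l.getD (l.length - 1) 0 := by
  rw [List.getLastD_eq_getLast?, List.getLast?_eq_getElem?]
  rfl

lemma pv_fall_spec (s : List (List Int)) (pi : List Nat) (i : Nat)
    (hspec : ∀ j, j < i → pvPiSpec s j (pi.getD j 0)) :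
    ∀ fuel m, m ≤ fuel → pvBrd s i m → m < i →
      (∀ k, k < i → pvBrd s i k → s.getD k [] = s.getD i [] → k ≤ m) →
      pvBrd s i (pvFall s pi (s.getD i []) fuel m) ∧
        pvFall s pi (s.getD i []) fuel m < i ∧
        (pvFall s pi (s.getD i []) fuel m = 0 ∨
          s.getD (pvFall s pi (s.getD i []) fuel m) [] = s.getD i []) ∧
        (∀ k, k < i → pvBrd s i k → s.getD k [] = s.getD i [] →
          k ≤ pvFall s pi (s.getD i []) fuel m) := by
  intro fuel
  induction fuel with
  | zero =>
    intro m hm hbrd hlt hinv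
    have hm0 : m = 0 := by omega
    subst hm0
    exact ⟨hbrd, hlt, Or.inl rfl, hinv⟩
  | succ fuel ih =>
    intro m hm hbrd hlt hinv
    by_cases hc : 0 < m ∧ s.getD i [] ≠ s.getD m []
    · rw [show pvFall s pi (s.getD i []) (fuel + 1) m
          = if 0 < m ∧ s.getD i [] ≠ s.getD m [] then
              pvFall s pi (s.getD i []) fuel (pi.getD (m - 1) 0) else m from rfl,
        if_pos hc]
      obtain ⟨hm0, hne⟩ := hc
      have hmi : m - 1 < i := by omega
      obtain ⟨hv1, hv2, hv3⟩ := hspec (m - 1) hmi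
      have hm1 : m - 1 + 1 = m := by omega
      rw [hm1] at hv2 hv3
      refine ih (pi.getD (m - 1) 0) (by omega) (pv_brd_trans s hbrd hv2) (by omega) ?_
      intro k hk hbk hmk
      have hkm : k ≤ m := hinv k hk hbk hmk
      have hkm' : k < m := by
        rcases Nat.lt_or_ge k m with h | h
        · exact h
        · have hkm2 : k = m := by omega
          subst hkm2
          exact absurd hmk.symm hne
      exact hv3 k (by omega) (pv_brd_sub s hbrd hbk hkm)
    · rw [show pvFall s pi (s.getD i []) (fuel + 1) m
          = if 0 < m ∧ s.getD i [] ≠ s.getD m [] then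
              pvFall s pi (s.getD i []) fuel (pi.getD (m - 1) 0) else m from rfl,
        if_neg hc]
      refine ⟨hbrd, hlt, ?_, hinv⟩
      rcases Nat.eq_zero_or_pos m with h0 | h0
      · exact Or.inl h0
      · push_neg at hc
        exact Or.inr (hc h0).symm

lemma pv_step_spec (s : List (List Int)) (pi : List Nat) (i : Nat)
    (hi : 1 ≤ i) (hlen : pi.length = i)
    (hspec : ∀ j, j < i → pvPiSpec s j (pi.getD j 0)) :
    pvPiSpec s i ((pvKmpStep s pi i).getD i 0) ∧
      (pvKmpStep s pi i).length = i + 1 ∧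
      ∀ j, j < i → (pvKmpStep s pi i).getD j 0 = pi.getD j 0 := by
  have hpine : pi ≠ [] := by
    intro h; rw [h] at hlen; simp at hlen; omega
  have hk0 : pi.getLastD 0 = pi.getD (i - 1) 0 := by
    rw [pv_getLastD_eq_getD pi hpine, hlen]
  obtain ⟨hv1, hv2, hv3⟩ := hspec (i - 1) (by omega)
  have hm1 : i - 1 + 1 = i := by omega
  rw [hm1] at hv2 hv3
  have hfall := pv_fall_spec s pi i hspec (pi.getD (i - 1) 0) (pi.getD (i - 1) 0)
    (le_refl _) hv2 (by omega) (fun k hk hbk _ => hv3 k (by omega) hbk)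
  set r := pvFall s pi (s.getD i []) (pi.getD (i - 1) 0) (pi.getD (i - 1) 0) with hrdef
  obtain ⟨hbr, hri, hror, hrinv⟩ := hfall
  set kn := if s.getD i [] == s.getD r [] then r + 1 else r with hkn
  have hgoal : pvPiSpec s i kn := by
    by_cases heq : s.getD i [] = s.getD r []
    · have hknv : kn = r + 1 := by rw [hkn, if_pos (beq_iff_eq.mpr heq)]
      rw [hknv]
      refine ⟨by omega, (pv_brd_ext s (by omega)).mpr ⟨hbr, heq.symm⟩, ?_⟩
      intro k hk hbk
      match k with
      | 0 => omega
      | t + 1 =>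
        obtain ⟨hbt, hte⟩ := (pv_brd_ext s (by omega)).mp hbk
        have := hrinv t (by omega) hbt hte
        omega
    · have hknv : kn = r := by
        rw [hkn, if_neg (by rw [beq_iff_eq]; exact heq)]
      have hr0 : r = 0 := by
        rcases hror with h | h
        · exact h
        · exact absurd h.symm heq
      rw [hknv, hr0]
      refine ⟨by omega, pv_brd_zero s (i + 1), ?_⟩
      intro k hk hbk
      match k with
      | 0 => omega
      | t + 1 =>
        obtain ⟨hbt, hte⟩ := (pv_brd_ext s (by omega)).mp hbk
        have htr := hrinv t (by omega) hbt hte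
        have ht0 : t = 0 := by omega
        subst ht0
        rw [hr0] at heq
        exact absurd hte.symm heq
  have hstep : pvKmpStep s pi i = pi ++ [kn] := by
    rw [pvKmpStep]
    simp only [hk0, ← hrdef, ← hkn]
  refine ⟨?_, by rw [hstep]; simp [hlen], ?_⟩
  · have hgi : (pvKmpStep s pi i).getD i 0 = kn := by
      rw [hstep, List.getD, List.getElem?_append_right (by omega)]
      simp [hlen]
    rwa [hgi]
  · intro j hj
    rw [hstep, List.getD, List.getD, List.getElem?_append_left (by omega)]

def pvPiList (s : List (List Int)) (m : Nat) : List Nat :=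
  (List.range' 1 m).foldl (pvKmpStep s) [0]

lemma pv_piList_spec (s : List (List Int)) (m : Nat) :
    (pvPiList s m).length = m + 1 ∧
      ∀ j, j ≤ m → pvPiSpec s j ((pvPiList s m).getD j 0) := by
  induction m with
  | zero =>
    refine ⟨rfl, fun j hj => ?_⟩
    have hj0 : j = 0 := by omega
    subst hj0
    exact ⟨le_refl _, pv_brd_zero s 1, fun k hk _ => hk⟩
  | succ m ih =>
    obtain ⟨ihlen, ihspec⟩ := ih
    have hunf : pvPiList s (m + 1) = pvKmpStep s (pvPiList s m) (m + 1) := by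
      rw [pvPiList, List.range'_1_concat, List.foldl_concat, Nat.add_comm 1 m]
      rfl
    have hstep := pv_step_spec s (pvPiList s m) (m + 1) (by omega)
      (by rw [ihlen]) (fun j hj => ihspec j (by omega))
    obtain ⟨hsp, hln, hunch⟩ := hstep
    constructor
    · rw [hunf, hln]
    · intro j hj
      rcases Nat.lt_or_ge j (m + 1) with hlt | hge
      · rw [hunf, hunch j (by omega)]
        exact ihspec j (by omega)
      · have hje : j = m + 1 := by omega
        subst hje
        rw [hunf]
        exact hsp

lemma pv_getD_map (idx : List Nat) (f : Nat → List Int) (j : Nat) (h : j < idx.length) :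
    (idx.map f).getD j [] = f (idx.getD j 0) := by
  simp [List.getD, List.getElem?_eq_getElem, h]

lemma pv_periodA_eq (idx : List Nat) (f : Nat → List Int) :
    (if idx.length < 2 then 1
     else
       match (List.range' 1 (idx.length - 1)).find? (fun p =>
           (List.range (idx.length - p)).all (fun i =>
             f (idx.getD i 0) == f (idx.getD (i + p) 0))) with
       | some p => p
       | none => idx.length)
    = periodB (idx.map f) := by
  rw [periodB]
  simp only [List.length_map]
  by_cases h2 : idx.length < 2
  · rw [if_pos h2, if_pos h2]
  · rw [if_neg h2, if_neg h2]
    set n := idx.length with hn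
    set s := idx.map f with hs
    have hsl : s.length = n := by rw [hs, List.length_map]
    obtain ⟨hplen, hpspec⟩ := pv_piList_spec s (n - 1)
    obtain ⟨hv1, hv2, hv3⟩ := hpspec (n - 1) (le_refl _)
    have hm1 : n - 1 + 1 = n := by omega
    rw [hm1] at hv2 hv3
    have hpl : ((List.range' 1 (n - 1)).foldl (pvKmpStep s) [0]).getLastD 0
        = (pvPiList s (n - 1)).getD (n - 1) 0 := by
      rw [show (List.range' 1 (n - 1)).foldl (pvKmpStep s) [0] = pvPiList s (n - 1) from rfl,
        pv_getLastD_eq_getD _ (by intro h; rw [h] at hplen; simp at hplen), hplen]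
      norm_num
    rw [hpl]
    set π := (pvPiList s (n - 1)).getD (n - 1) 0 with hπ
    have hpred : ∀ p, 1 ≤ p → p < n →
        (((List.range (n - p)).all (fun i =>
          f (idx.getD i 0) == f (idx.getD (i + p) 0))) = true ↔ pvBrd s n (n - p)) := by
      intro p hp1 hp2
      rw [List.all_eq_true]
      constructor
      · intro h
        refine ⟨by omega, fun j hj => ?_⟩
        have h3 := h j (List.mem_range.mpr hj)
        rw [beq_iff_eq] at h3
        rw [pv_getD_map idx f j (by omega), pv_getD_map idx f (n - (n - p) + j) (by omega)]
        have he : n - (n - p) + j = j + p := by omega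
        rw [he]
        exact h3
      · intro ⟨_, h⟩ i hi
        rw [List.mem_range] at hi
        have h3 := h i hi
        rw [pv_getD_map idx f i (by omega), pv_getD_map idx f (n - (n - p) + i) (by omega)] at h3
        have he : n - (n - p) + i = i + p := by omega
        rw [he] at h3
        rw [beq_iff_eq]
        exact h3
    by_cases hπ0 : π = 0
    · have hnone : (List.range' 1 (n - 1)).find? (fun p =>
          (List.range (n - p)).all (fun i =>
            f (idx.getD i 0) == f (idx.getD (i + p) 0))) = none := by
        rw [List.find?_range'_eq_none]
        intro q hq1 hq2
        cases hqt : ((List.range (n - q)).all (fun i =>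
            f (idx.getD i 0) == f (idx.getD (i + q) 0))) with
        | false => rfl
        | true =>
          exfalso
          have hbrd := (hpred q hq1 (by omega)).mp hqt
          have := hv3 (n - q) (by omega) hbrd
          omega
      rw [hnone, hπ0]
      simp
    · have hp1 : 1 ≤ n - π := by omega
      have hp2 : n - π ≤ n - 1 := by omega
      have hsome : (List.range' 1 (n - 1)).find? (fun p =>
          (List.range (n - p)).all (fun i =>
            f (idx.getD i 0) == f (idx.getD (i + p) 0))) = some (n - π) := by
        rw [List.find?_range'_eq_some]
        refine ⟨?_, ?_, ?_⟩
        · rw [hpred (n - π) hp1 (by omega)]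
          have he : n - (n - π) = π := by omega
          rw [he]
          exact hv2
        · rw [List.mem_range'_1]
          omega
        · intro j hj1 hj2
          cases hjt : ((List.range (n - j)).all (fun i =>
              f (idx.getD i 0) == f (idx.getD (i + j) 0))) with
          | false => rfl
          | true =>
            exfalso
            have hbrd := (hpred j hj1 (by omega)).mp hjt
            have := hv3 (n - j) (by omega) hbrd
            omega
      rw [hsome]

-- ---- part 2: canonical names for the sub-terms both ports compute ----
def pvCols (grid : List (List Int)) : Nat := (grid.headD []).length
def pvRowAny (grid : List (List Int)) (r : Nat) : Bool :=
  (List.range (pvCols grid)).any (fun c => (grid.getD r []).getD c 0 == 8)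
def pvColAny (grid : List (List Int)) (c : Nat) : Bool :=
  (List.range grid.length).any (fun r => (grid.getD r []).getD c 0 == 8)
def pvR8 (grid : List (List Int)) : List Nat :=
  (List.range grid.length).filter (fun r => pvRowAny grid r)
def pvC8 (grid : List (List Int)) : List Nat :=
  (List.range (pvCols grid)).filter (fun c => pvColAny grid c)
def pvSafeR (grid : List (List Int)) : List Nat :=
  (List.range grid.length).filter (fun r =>
    (List.range (pvCols grid)).all (fun c => !((grid.getD r []).getD c 0 == 8)))
def pvSafeC (grid : List (List Int)) : List Nat :=
  (List.range (pvCols grid)).filter (fun c =>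
    (List.range grid.length).all (fun r => !((grid.getD r []).getD c 0 == 8)))
def pvEights (grid : List (List Int)) : List (Nat × Nat) :=
  ((List.range grid.length).map (fun r =>
    ((List.range (pvCols grid)).filter (fun c => (grid.getD r []).getD c 0 == 8)).map (fun c => (r, c)))).flatten

lemma pv_getD_set_self (l : List (List Int)) (i : Nat) (v : List Int) (h : i < l.length) :
    (l.set i v).getD i [] = v := by
  simp [List.getD, h]

lemma pv_getD_set_ne (l : List (List Int)) (i j : Nat) (v : List Int) (h : i ≠ j) :
    (l.set i v).getD j [] = l.getD j [] := by
  simp [List.getD, List.getElem?_set_ne h]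

lemma pv_set_getD_self (l : List (List Int)) (i : Nat) (h : i < l.length) :
    l.set i (l.getD i []) = l := by
  simp [List.getD, List.getElem?_eq_getElem h]

lemma pv_filter_range_sorted (n : Nat) (p : Nat → Bool) :
    ((List.range n).filter p).Pairwise (· < ·) :=
  List.Pairwise.filter p List.pairwise_lt_range

lemma pv_headD_le {l : List Nat} (h : l.Pairwise (· < ·)) : ∀ x ∈ l, l.headD 0 ≤ x := by
  intro x hx
  cases l with
  | nil => cases hx
  | cons a t =>
    rcases List.mem_cons.mp hx with rfl | hxt
    · exact le_refl _
    · exact le_of_lt ((List.pairwise_cons.mp h).1 x hxt)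

lemma pv_headD_mem {l : List Nat} (h : l ≠ []) : l.headD 0 ∈ l := by
  cases l with
  | nil => exact absurd rfl h
  | cons a t => exact List.mem_cons_self

lemma pv_getLastD_ge {l : List Nat} (h : l.Pairwise (· < ·)) : ∀ x ∈ l, x ≤ l.getLastD 0 := by
  intro x hx
  rw [List.getLastD_eq_getLast?, ← List.head?_reverse, ← List.headD_eq_head?]
  have hrev : l.reverse.Pairwise (fun a b => b < a) := by
    rw [List.pairwise_reverse]; exact h
  have hx' : x ∈ l.reverse := List.mem_reverse.mpr hx
  cases hl : l.reverse with
  | nil => rw [hl] at hx'; cases hx'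
  | cons a t =>
    rw [hl] at hx' hrev
    rcases List.mem_cons.mp hx' with rfl | hxt
    · exact le_refl _
    · exact le_of_lt ((List.pairwise_cons.mp hrev).1 x hxt)

lemma pv_getLastD_mem {l : List Nat} (h : l ≠ []) : l.getLastD 0 ∈ l := by
  rw [List.getLastD_eq_getLast?, ← List.head?_reverse, ← List.headD_eq_head?]
  have h' : l.reverse ≠ [] := by simpa using h
  exact List.mem_reverse.mp (pv_headD_mem h')

lemma pv_minD_eq_headD (l s : List Nat) (hs : s.Pairwise (· < ·))
    (hmem : ∀ x, x ∈ l ↔ x ∈ s) (hne : l ≠ []) :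
    (PySem.List.min? l (fun x => x)).getD 0 = s.headD 0 := by
  have hsne : s ≠ [] := by
    cases l with
    | nil => exact absurd rfl hne
    | cons a t => exact List.ne_nil_of_mem ((hmem a).mp List.mem_cons_self)
  cases h : PySem.List.min? l (fun x => x) with
  | none => exact absurd ((PySem.List.min?_eq_none_iff _ _).mp h) hne
  | some m =>
    have hm : m ∈ l := PySem.List.min?_mem h
    have hmin : ∀ y ∈ l, m ≤ y := fun y hy => PySem.List.min?_isMin h y hy
    have hh : s.headD 0 ∈ s := pv_headD_mem hsne
    simp only [Option.getD_some]
    exact le_antisymm (hmin _ ((hmem _).mpr hh)) (pv_headD_le hs m ((hmem m).mp hm))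

lemma pv_maxD_eq_getLastD (l s : List Nat) (hs : s.Pairwise (· < ·))
    (hmem : ∀ x, x ∈ l ↔ x ∈ s) (hne : l ≠ []) :
    (PySem.List.max? l (fun x => x)).getD 0 = s.getLastD 0 := by
  have hsne : s ≠ [] := by
    cases l with
    | nil => exact absurd rfl hne
    | cons a t => exact List.ne_nil_of_mem ((hmem a).mp List.mem_cons_self)
  cases h : PySem.List.max? l (fun x => x) with
  | none => exact absurd ((PySem.List.max?_eq_none_iff _ _).mp h) hne
  | some m =>
    have hm : m ∈ l := PySem.List.max?_mem h
    have hmax : ∀ y ∈ l, y ≤ m := fun y hy => PySem.List.max?_isMax h y hy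
    have hh : s.getLastD 0 ∈ s := pv_getLastD_mem hsne
    simp only [Option.getD_some]
    exact le_antisymm (pv_getLastD_ge hs m ((hmem m).mp hm)) (hmax _ ((hmem _).mpr hh))

lemma pv_mem_fst_eights (grid : List (List Int)) (x : Nat) :
    x ∈ (pvEights grid).map (fun e => e.1) ↔ x ∈ pvR8 grid := by
  simp only [pvEights, pvR8, pvRowAny, List.mem_map, List.mem_flatten, List.mem_filter,
    List.mem_range, List.any_eq_true]
  aesop

lemma pv_mem_snd_eights (grid : List (List Int)) (x : Nat) :
    x ∈ (pvEights grid).map (fun e => e.2) ↔ x ∈ pvC8 grid := by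
  simp only [pvEights, pvC8, pvColAny, List.mem_map, List.mem_flatten, List.mem_filter,
    List.mem_range, List.any_eq_true]
  aesop

lemma pv_eights_nil_iff_r8 (grid : List (List Int)) : pvEights grid = [] ↔ pvR8 grid = [] := by
  rw [List.eq_nil_iff_forall_not_mem, List.eq_nil_iff_forall_not_mem]
  constructor
  · intro h x hx
    obtain ⟨e, he, _⟩ := List.mem_map.mp ((pv_mem_fst_eights grid x).mpr hx)
    exact h e he
  · intro h e he
    exact h e.1 ((pv_mem_fst_eights grid e.1).mp (List.mem_map.mpr ⟨e, he, rfl⟩))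

lemma pv_any_iff_r8 (grid : List (List Int)) :
    (grid.map (fun row => (List.range (pvCols grid)).any (fun c => row.getD c 0 == 8))).any (fun b => b) = false
      ↔ pvR8 grid = [] := by
  rw [List.any_map, List.any_eq_false, pvR8, List.filter_eq_nil_iff]
  simp only [Function.comp, List.forall_mem_iff_getElem, List.mem_range]
  constructor
  · intro h r hr
    have h2 := h r (by simpa using hr)
    simpa [pvRowAny, List.getElem?_eq_getElem hr] using h2
  · intro h r hr
    have hr' : r < grid.length := by simpa using hr
    have h2 := h r (by simpa using hr)
    simpa [pvRowAny, List.getElem?_eq_getElem hr'] using h2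

lemma pv_B_r8_eq (grid : List (List Int)) :
    (List.range grid.length).filter (fun r =>
      (grid.map (fun row => (List.range (pvCols grid)).any (fun c => row.getD c 0 == 8))).getD r false)
    = pvR8 grid := by
  apply List.filter_congr
  intro r hr
  rw [List.mem_range] at hr
  simp [pvRowAny, List.getD, List.getElem?_map, List.getElem?_eq_getElem hr]

lemma pv_B_c8_eq (grid : List (List Int)) :
    (List.range (pvCols grid)).filter (fun c =>
      ((List.range (pvCols grid)).map (fun c =>
        (List.range grid.length).any (fun r => (grid.getD r []).getD c 0 == 8))).getD c false)
    = pvC8 grid := by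
  apply List.filter_congr
  intro c hc
  rw [List.mem_range] at hc
  simp [pvColAny, List.getD, hc]

lemma pv_B_safeR_eq (grid : List (List Int)) :
    (List.range grid.length).filter (fun r =>
      !((grid.map (fun row => (List.range (pvCols grid)).any (fun c => row.getD c 0 == 8))).getD r false))
    = pvSafeR grid := by
  apply List.filter_congr
  intro r hr
  rw [List.mem_range] at hr
  simp [List.getD, List.getElem?_map, List.getElem?_eq_getElem hr, ← List.not_any_eq_all_not]

lemma pv_B_safeC_eq (grid : List (List Int)) :
    (List.range (pvCols grid)).filter (fun c =>
      !(((List.range (pvCols grid)).map (fun c =>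
        (List.range grid.length).any (fun r => (grid.getD r []).getD c 0 == 8))).getD c false))
    = pvSafeC grid := by
  apply List.filter_congr
  intro c hc
  rw [List.mem_range] at hc
  simp [List.getD, hc, ← List.not_any_eq_all_not]

-- ---- part 3: reshaping B's fused fill loop into A's nested-if form ----

lemma pv_if_and {α : Type} (a b : Bool) (x y : α) :
    (if a && b then x else y) = if a = true then (if b = true then x else y) else y := by
  cases a <;> cases b <;> simp

lemma pvB_inner_eq (grid : List (List Int)) (sr sc : List Nat) (rp cp minc w r : Nat)
    (init : List Int) :
    ((List.range' minc w).map (fun c => (c, if sc = [] then c else sc.getD (c % cp) 0))).foldl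
      (fun nw p => if (grid.getD r []).getD p.1 0 == 1 &&
          (if sr = [] then grid.getD r [] else grid.getD (sr.getD (r % rp) 0) []).getD p.2 0 == 0
        then nw.set p.1 3 else nw) init
    = (List.range' minc w).foldl (fun nw c =>
        if (grid.getD r []).getD c 0 == 1 then
          (if (grid.getD (if sr = [] then r else sr.getD (r % rp) 0) []).getD
               (if sc = [] then c else sc.getD (c % cp) 0) 0 == 0 then nw.set c 3 else nw)
        else nw) init := by
  rw [List.foldl_map]
  have hrr : (if sr = [] then grid.getD r [] else grid.getD (sr.getD (r % rp) 0) [])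
      = grid.getD (if sr = [] then r else sr.getD (r % rp) 0) [] := by
    split <;> rfl
  simp only [hrr, pv_if_and]

lemma pv_inner_commute (P R : Nat → Bool) (r : Nat) (cs : List Nat) :
    ∀ (res : List (List Int)), r < res.length →
    cs.foldl (fun res2 c =>
        if P c then (if R c then res2.set r ((res2.getD r []).set c 3) else res2) else res2) res
    = res.set r (cs.foldl (fun row c =>
        if P c then (if R c then row.set c 3 else row) else row) (res.getD r [])) := by
  induction cs with
  | nil => intro res h; exact (pv_set_getD_self res r h).symm
  | cons c t ih =>
    intro res h
    simp only [List.foldl_cons]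
    by_cases hP : P c
    · by_cases hR : R c
      · rw [if_pos hP, if_pos hR, if_pos hP, if_pos hR]
        rw [ih (res.set r ((res.getD r []).set c 3)) (by simpa using h)]
        rw [pv_getD_set_self res r _ h, List.set_set]
      · rw [if_pos hP, if_neg hR, if_pos hP, if_neg hR]
        exact ih res h
    · rw [if_neg hP, if_neg hP]
      exact ih res h

lemma pv_nested_fill (P R : Nat → Nat → Bool) (cs : List Nat) :
    ∀ (rs : List Nat) (init : List (List Int)), rs.Nodup → (∀ r ∈ rs, r < init.length) →
    (((rs.foldl (fun res r => cs.foldl (fun res2 c =>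
        if P r c then (if R r c then res2.set r ((res2.getD r []).set c 3) else res2) else res2) res) init).length
      = init.length)
     ∧ (∀ j : Nat,
        (rs.foldl (fun res r => cs.foldl (fun res2 c =>
          if P r c then (if R r c then res2.set r ((res2.getD r []).set c 3) else res2) else res2) res) init).getD j []
        = if j ∈ rs then
            cs.foldl (fun row c => if P j c then (if R j c then row.set c 3 else row) else row) (init.getD j [])
          else init.getD j [])) := by
  intro rs
  induction rs with
  | nil => intro init _ _; exact ⟨rfl, fun j => by simp⟩
  | cons r rs ih =>
    intro init hnd hlt
    have hr : r < init.length := hlt r List.mem_cons_self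
    have hnd' := (List.nodup_cons.mp hnd)
    simp only [List.foldl_cons]
    rw [pv_inner_commute (P r) (R r) r cs init hr]
    set g := cs.foldl (fun row c => if P r c then (if R r c then row.set c 3 else row) else row) (init.getD r []) with hg
    have hlen' : (init.set r g).length = init.length := by simp
    have hlt' : ∀ x ∈ rs, x < (init.set r g).length := fun x hx => hlen' ▸ hlt x (List.mem_cons_of_mem r hx)
    obtain ⟨ihlen, ihget⟩ := ih (init.set r g) hnd'.2 hlt'
    constructor
    · rw [ihlen, hlen']
    · intro j
      rw [ihget j]
      by_cases hj : j ∈ rs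
      · have hjr : r ≠ j := fun h => hnd'.1 (h ▸ hj)
        rw [if_pos hj, if_pos (List.mem_cons_of_mem r hj), pv_getD_set_ne init r j g hjr]
      · by_cases hjr : j = r
        · subst hjr
          rw [if_neg hj, if_pos List.mem_cons_self, pv_getD_set_self init j g hr]
        · rw [if_neg hj, if_neg (by simp [hjr, hj]), pv_getD_set_ne init r j g (Ne.symm hjr)]

lemma pv_eights_def (grid : List (List Int)) :
    (List.map (fun r => List.map (fun c => (r, c))
      (List.filter (fun c => (grid.getD r []).getD c 0 == 8) (List.range (pvCols grid))))
      (List.range grid.length)).flatten = pvEights grid := rfl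

lemma pv_safeR_def (grid : List (List Int)) :
    List.filter (fun r => (List.range (pvCols grid)).all fun c => !(grid.getD r []).getD c 0 == 8)
      (List.range grid.length) = pvSafeR grid := rfl

lemma pv_safeC_def (grid : List (List Int)) :
    List.filter (fun c => (List.range grid.length).all fun r => !(grid.getD r []).getD c 0 == 8)
      (List.range (pvCols grid)) = pvSafeC grid := rfl

lemma pv_rowPeriod_eq (grid : List (List Int)) :
    findRowPeriodA grid = periodB ((pvSafeR grid).map (fun r => grid.getD r [])) := by
  unfold findRowPeriodA
  exact pv_periodA_eq (pvSafeR grid) (fun r => grid.getD r [])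

lemma pv_colPeriod_eq (grid : List (List Int)) :
    findColPeriodA grid
      = periodB ((pvSafeC grid).map (fun c =>
          (List.range grid.length).map (fun r => (grid.getD r []).getD c 0))) := by
  unfold findColPeriodA
  exact pv_periodA_eq (pvSafeC grid)
    (fun c => (List.range grid.length).map (fun r => (grid.getD r []).getD c 0))

theorem solve_spec' (grid : List (List Int)) : solve grid = solve_alt grid := by
  simp only [solve, solve_alt]
  rw [show (grid.headD []).length = pvCols grid from rfl]
  rw [pv_eights_def, pv_safeR_def, pv_safeC_def, pv_rowPeriod_eq, pv_colPeriod_eq]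
  rw [pv_B_r8_eq, pv_B_c8_eq, pv_B_safeR_eq, pv_B_safeC_eq]
  by_cases h8 : pvEights grid = []
  · rw [if_pos h8]
    have hb := (pv_any_iff_r8 grid).mpr ((pv_eights_nil_iff_r8 grid).mp h8)
    rw [hb, if_neg (by simp : ¬ (false = true))]
  · rw [if_neg h8]
    have hb : ((grid.map (fun row => (List.range (pvCols grid)).any (fun c => row.getD c 0 == 8))).any (fun b => b)) = true := by
      by_contra hcon
      exact h8 ((pv_eights_nil_iff_r8 grid).mpr ((pv_any_iff_r8 grid).mp (Bool.eq_false_iff.mpr hcon)))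
    rw [hb, if_pos rfl]
    simp only [pvB_inner_eq]
    have hr8ne : pvR8 grid ≠ [] := fun hh => h8 ((pv_eights_nil_iff_r8 grid).mpr hh)
    have hc8ne : pvC8 grid ≠ [] := by
      cases he : pvEights grid with
      | nil => exact absurd he h8
      | cons e t =>
        have hmem : e ∈ pvEights grid := by rw [he]; exact List.mem_cons_self
        exact List.ne_nil_of_mem ((pv_mem_snd_eights grid e.2).mp (List.mem_map.mpr ⟨e, hmem, rfl⟩))
    have hfstne : (pvEights grid).map (fun e => e.1) ≠ [] := by
      simpa [List.map_eq_nil_iff] using h8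
    have hsndne : (pvEights grid).map (fun e => e.2) ≠ [] := by
      simpa [List.map_eq_nil_iff] using h8
    have hsortR : (pvR8 grid).Pairwise (· < ·) := pv_filter_range_sorted grid.length _
    have hsortC : (pvC8 grid).Pairwise (· < ·) := pv_filter_range_sorted (pvCols grid) _
    have hminr := pv_minD_eq_headD _ _ hsortR (pv_mem_fst_eights grid) hfstne
    have hmaxr := pv_maxD_eq_getLastD _ _ hsortR (pv_mem_fst_eights grid) hfstne
    have hminc := pv_minD_eq_headD _ _ hsortC (pv_mem_snd_eights grid) hsndne
    have hmaxc := pv_maxD_eq_getLastD _ _ hsortC (pv_mem_snd_eights grid) hsndne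
    rw [hminr, hmaxr, hminc, hmaxc, List.map_id']
    have hminmax : (pvR8 grid).headD 0 ≤ (pvR8 grid).getLastD 0 :=
      pv_headD_le hsortR _ (pv_getLastD_mem hr8ne)
    have hmaxlt : (pvR8 grid).getLastD 0 < grid.length := by
      have hm := pv_getLastD_mem hr8ne
      rw [pvR8, List.mem_filter, List.mem_range] at hm
      exact hm.1
    set minr := (pvR8 grid).headD 0
    set maxr := (pvR8 grid).getLastD 0
    set rs := List.range' minr (maxr + 1 - minr) with hrs
    have hlt : ∀ r ∈ rs, r < grid.length := by
      intro r hrm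
      rw [hrs, List.mem_range'_1] at hrm
      omega
    obtain ⟨hlen, hget⟩ := pv_nested_fill
      (fun r c => (grid.getD r []).getD c 0 == 1)
      (fun r c =>
        ((grid.getD (if pvSafeR grid = [] then r
            else (pvSafeR grid).getD (r % periodB (List.map (fun r => grid.getD r []) (pvSafeR grid))) 0) []).getD
          (if pvSafeC grid = [] then c
            else (pvSafeC grid).getD (c % periodB (List.map (fun c =>
              List.map (fun r => (grid.getD r []).getD c 0) (List.range grid.length)) (pvSafeC grid))) 0) 0 == 0))
      (List.range' ((pvC8 grid).headD 0) ((pvC8 grid).getLastD 0 + 1 - (pvC8 grid).headD 0))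
      rs grid (List.nodup_range') hlt
    apply List.ext_getElem
    · rw [hlen]; simp
    · intro j h1 h2
      have hA : _ = _ := (List.getD_eq_getElem _ [] h1).symm
      rw [hA, hget j]
      simp only [List.getElem_map, List.getElem_range]
      exact if_congr (by rw [hrs, List.mem_range'_1]; omega) rfl rfl

-- ===== VERDICT (by name: the statement is the Claim_ definition above) =====
theorem solve_spec : Claim_equal_solve := by
  intro grid _ _
  exact solve_spec' grid
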